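-- pv_equiv track=rewrite | github.com/regulatorystudies/Reg-Stats | dynamic_dashboard/unified_agenda_data/unified_agenda_data_analysis.py | _agenda_number_within_admin
-- ===== SOURCE A (Python) =====
-- ADMIN_TERMS = {
--     'Clinton': [(1993, 2001)],
--     'Bush 43': [(2001, 2009)],
--     'Obama': [(2009, 2017)],
--     'Trump 45': [(2017, 2021)],
--     'Biden': [(2021, 2025)],
--     'Trump 47': [(2025, 2029)],
-- }
--
-- def _agenda_number_within_admin(admin: str, year: int, season: str) -> int:
--     """
--     Agenda number is 1-based within an administration.
--     """
--     season_offset = 1 if season == 'spring' else 2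
--     agendas_before = 0
--     for start, end in ADMIN_TERMS[admin]:
--         if year < start:
--             break
--         if start <= year < end:
--             return agendas_before + (year - start) * 2 + season_offset
--         agendas_before += (end - start) * 2
--     raise ValueError(f"Year {year} not in administration {admin}.")
-- ===== SOURCE B (Python) =====
-- ADMIN_TERMS = {
--     'Clinton': [(1993, 2001)],
--     'Bush 43': [(2001, 2009)],
--     'Obama': [(2009, 2017)],
--     'Trump 45': [(2017, 2021)],
--     'Biden': [(2021, 2025)],
--     'Trump 47': [(2025, 2029)],
-- }
--
-- def _agenda_number_within_admin(admin: str, year: int, season: str) -> int: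
--     """Build a year -> base-agenda-number index for the administration, then look the year up."""
--     year_base = {}
--     n = 0
--     for start, end in ADMIN_TERMS[admin]:
--         for y in range(start, end):
--             year_base[y] = n
--             n += 2
--     if year not in year_base:
--         raise ValueError(f"Year {year} not in administration {admin}.")
--     return year_base[year] + (1 if season == 'spring' else 2)
-- ===== Notes on version B (the rewrite author's own statement) =====
-- stated objective: alternative
-- what changed: Replaces A's interval scan (running accumulator, range tests, early break) by materialising a hash index from each covered year to its base agenda number and answering with a single dictionary lookup.
-- outside the precondition, e.g. on _agenda_number_within_admin('Clinton', 1990, 'spring'): A raises ValueError, B raises ValueError; on _agenda_number_within_admin('Nixon', 1970, 'fall'): A raises KeyError, B raises KeyError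
import Mathlib
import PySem

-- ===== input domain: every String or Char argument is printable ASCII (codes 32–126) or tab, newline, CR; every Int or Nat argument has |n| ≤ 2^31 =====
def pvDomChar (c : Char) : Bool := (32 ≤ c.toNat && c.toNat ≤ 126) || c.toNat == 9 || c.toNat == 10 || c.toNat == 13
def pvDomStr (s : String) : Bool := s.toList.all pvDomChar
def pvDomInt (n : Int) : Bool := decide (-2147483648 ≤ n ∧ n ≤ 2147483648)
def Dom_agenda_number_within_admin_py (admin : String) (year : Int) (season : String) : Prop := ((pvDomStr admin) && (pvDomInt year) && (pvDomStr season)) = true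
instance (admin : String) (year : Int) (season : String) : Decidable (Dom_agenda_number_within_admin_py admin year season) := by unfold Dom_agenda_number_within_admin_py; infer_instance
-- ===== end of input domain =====

-- B replaces A's interval scan by building a year->base dictionary and a single lookup; equal on all inputs where A returns (Pre_).


-- module-level constant ADMIN_TERMS, shared by both Pythons
def pvAdminTerms : PySem.Dict String (List (Int × Int)) :=
  PySem.Dict.ofList [("Clinton", [(1993, 2001)]), ("Bush 43", [(2001, 2009)]),
    ("Obama", [(2009, 2017)]), ("Trump 45", [(2017, 2021)]),
    ("Biden", [(2021, 2025)]), ("Trump 47", [(2025, 2029)])]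

-- ===== PORT A =====
-- A's for-loop: accumulator agendas_before; 'break' and fall-through both end in raise → none
def pvALoop (year season_offset : Int) : List (Int × Int) → Int → Option Int
  | [], _ => none
  | (s, e) :: rest, acc =>
    if year < s then none
    else if s ≤ year ∧ year < e then some (acc + (year - s) * 2 + season_offset)
    else pvALoop year season_offset rest (acc + (e - s) * 2)

def agenda_number_within_admin_py (admin : String) (year : Int) (season : String) : Int :=
  let season_offset : Int := if season = "spring" then 1 else 2
  match pvAdminTerms.get? admin with
  | none => 0      -- KeyError: excluded by Pre_
  | some terms =>
    match pvALoop year season_offset terms 0 with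
    | none => 0    -- ValueError: excluded by Pre_
    | some v => v

-- ===== PORT B =====
-- B: build year_base : dict year -> base agenda number (nested loops over terms and range(start,end)),
-- then a single lookup
def pvBBuild (terms : List (Int × Int)) : PySem.Dict Int Int × Int :=
  terms.foldl
    (fun st p =>
      (PySem.List.pyRange p.1 p.2 1).foldl (fun st2 y => (st2.1.insert y st2.2, st2.2 + 2)) st)
    (PySem.Dict.empty, 0)

def agenda_number_within_admin_py_alt (admin : String) (year : Int) (season : String) : Int :=
  match pvAdminTerms.get? admin with
  | none => 0      -- KeyError: excluded by Pre_
  | some terms =>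
    match (pvBBuild terms).1.get? year with
    | none => 0    -- ValueError: excluded by Pre_
    | some b => b + (if season = "spring" then 1 else 2)

-- ===== PRECONDITION & SPEC =====
-- Pre_ excludes exactly the inputs on which A raises: KeyError for an admin not in
-- ADMIN_TERMS, ValueError for a year outside that admin's (single) term.
def Pre_agenda_number_within_admin_py (admin : String) (year : Int) (season : String) : Prop :=
  (admin = "Clinton" ∧ 1993 ≤ year ∧ year < 2001) ∨
  (admin = "Bush 43" ∧ 2001 ≤ year ∧ year < 2009) ∨
  (admin = "Obama" ∧ 2009 ≤ year ∧ year < 2017) ∨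
  (admin = "Trump 45" ∧ 2017 ≤ year ∧ year < 2021) ∨
  (admin = "Biden" ∧ 2021 ≤ year ∧ year < 2025) ∨
  (admin = "Trump 47" ∧ 2025 ≤ year ∧ year < 2029)
instance (admin : String) (year : Int) (season : String) : Decidable (Pre_agenda_number_within_admin_py admin year season) := by unfold Pre_agenda_number_within_admin_py; infer_instance

def pvWitness_agenda_number_within_admin_py : String × Int × String := ("Obama", 2013, "fall")

def Spec_agenda_number_within_admin_py (admin : String) (year : Int) (season : String) (out : Int) : Prop := out = agenda_number_within_admin_py_alt admin year season
instance (admin : String) (year : Int) (season : String) (out : Int) : Decidable (Spec_agenda_number_within_admin_py admin year season out) := by unfold Spec_agenda_number_within_admin_py; infer_instance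

-- ===== CLAIM =====
def Claim_equal_agenda_number_within_admin_py : Prop := ∀ (admin : String) (year : Int) (season : String), Dom_agenda_number_within_admin_py admin year season → Pre_agenda_number_within_admin_py admin year season → Spec_agenda_number_within_admin_py admin year season (agenda_number_within_admin_py admin year season)

-- ===== LEMMAS AND PROOFS =====

-- for each admin the term is single and concrete; case on the (at most 8) years and evaluate both ports
lemma pv_one_admin (admin : String) (year : Int) (season : String) (s e : Int)
    (hget : pvAdminTerms.get? admin = some [(s, e)])
    (hd : ∀ y : Int, s ≤ y → y < e →
      (pvBBuild [(s, e)]).1.get? y = some ((y - s) * 2))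
    (h1 : s ≤ year) (h2 : year < e) :
    agenda_number_within_admin_py admin year season
      = agenda_number_within_admin_py_alt admin year season := by
  simp only [agenda_number_within_admin_py, agenda_number_within_admin_py_alt, hget,
    pvALoop, hd year h1 h2, if_neg (by omega : ¬ year < s), if_pos (And.intro h1 h2)]
  ring

-- ===== VERDICT =====
theorem agenda_number_within_admin_py_spec : Claim_equal_agenda_number_within_admin_py := by
  intro admin year season _ hpre
  unfold Spec_agenda_number_within_admin_py
  rcases hpre with ⟨ha, h1, h2⟩ | ⟨ha, h1, h2⟩ | ⟨ha, h1, h2⟩ | ⟨ha, h1, h2⟩ | ⟨ha, h1, h2⟩ | ⟨ha, h1, h2⟩ <;>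
    subst ha <;>
    refine (pv_one_admin _ year season _ _ ?_ (fun y hy1 hy2 => ?_) h1 h2) <;>
    first
      | decide
      | (interval_cases y <;> decide)
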